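-- pv_equiv track=rewrite | github.com/afragalli/E-Deploy | answer_3.py | _calculate_paths_to_position
-- ===== SOURCE A (Python) =====
-- def _calculate_paths_to_position(position: int, turn: int) -> int:
--     """
--     Calculates the number of paths to reach a position in exactly N turns.
--
--     Recursive function that counts all jump sequences
--     (1, 2 or 3 positions) that allow reaching position 'position' exactly after
--     'turn' moves, starting from position 1.
--
--     Args:
--         position (int): Destination position (1-indexed). Must be positive.
--         turn (int): Exact number of turns to reach the position. Must be non-negative.
--
--     Returns:
--         int: Number of valid paths to reach 'position' in exactly 'turn' turns.
--              Returns 0 if it's not possible to reach the position with the specified number of turns.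
--     """
--     if position == 1 and turn == 0:
--         return 1
--     if position < 1 or turn <= 0:
--         return 0
--
--     total = 0
--     for jump in (1, 2, 3):
--         total += _calculate_paths_to_position(position - jump, turn - 1)
--     return total
-- ===== SOURCE B (Python) =====
-- def _calculate_paths_to_position(position: int, turn: int) -> int:
--     # Bottom-up DP: count compositions of (position - 1) into exactly `turn`
--     # parts from {1, 2, 3}, instead of the exponential ternary recursion.
--     n = position - 1
--     k = turn
--     if n < 0 or k < 0 or n < k or n > 3 * k:
--         return 0
--     dp = [1] + [0] * n
--     for _ in range(k):
--         dp = [0] + [dp[j - 1]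
--                     + (dp[j - 2] if j >= 2 else 0)
--                     + (dp[j - 3] if j >= 3 else 0)
--                     for j in range(1, n + 1)]
--     return dp[n]
-- ===== Notes on version B (the rewrite author's own statement) =====
-- stated objective: faster
-- what changed: Replaced the exponential ternary recursion with a bottom-up DP table over (offset, turn) counting compositions of position-1 into exactly `turn` parts from {1,2,3}; intended as faster (probe read B ~3889x where both finished, unconfirmed since A times out on larger inputs).
import Mathlib
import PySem

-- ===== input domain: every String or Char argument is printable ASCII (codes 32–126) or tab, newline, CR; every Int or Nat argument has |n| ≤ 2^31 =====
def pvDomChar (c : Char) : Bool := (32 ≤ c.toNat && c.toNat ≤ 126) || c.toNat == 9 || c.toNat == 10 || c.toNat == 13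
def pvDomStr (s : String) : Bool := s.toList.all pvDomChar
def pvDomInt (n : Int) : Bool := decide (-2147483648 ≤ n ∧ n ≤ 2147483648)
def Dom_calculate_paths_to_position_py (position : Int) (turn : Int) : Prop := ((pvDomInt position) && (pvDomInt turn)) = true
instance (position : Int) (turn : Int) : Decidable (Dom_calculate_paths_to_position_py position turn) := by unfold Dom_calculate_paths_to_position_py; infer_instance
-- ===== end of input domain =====

-- B replaces A's exponential ternary recursion by a bottom-up DP table, intended as
-- asymptotically faster (a timing run read B far ahead where both finished, but A
-- timed out on larger inputs so the measurement is unconfirmed). Equivalence is proved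
-- on all inputs satisfying Pre_ (which excludes only A's RecursionError region).

-- ===== PORT A =====
-- Literal port of the Python recursion; the loop `for jump in (1,2,3): total += …`
-- is the left-to-right sum starting from total = 0.
def calculate_paths_to_position_py (position : Int) (turn : Int) : Int :=
  if position = 1 ∧ turn = 0 then 1
  else if position < 1 ∨ turn ≤ 0 then 0
  else
    0 + calculate_paths_to_position_py (position - 1) (turn - 1)
      + calculate_paths_to_position_py (position - 2) (turn - 1)
      + calculate_paths_to_position_py (position - 3) (turn - 1)
termination_by turn.toNat
decreasing_by all_goals (simp only [not_and, not_or, not_lt, not_le] at *; omega)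

-- ===== PORT B =====
-- one DP step: dp' = [0] + [dp[j-1] + (dp[j-2] if j>=2 else 0) + (dp[j-3] if j>=3 else 0) for j in range(1, n+1)]
def pvAltStep (n : Nat) (dp : List Int) : List Int :=
  0 :: (List.range' 1 n).map (fun j =>
    dp.getD (j - 1) 0
      + (if j ≥ 2 then dp.getD (j - 2) 0 else 0)
      + (if j ≥ 3 then dp.getD (j - 3) 0 else 0))

def calculate_paths_to_position_py_alt (position : Int) (turn : Int) : Int :=
  let n := position - 1
  let k := turn
  if n < 0 ∨ k < 0 ∨ n < k ∨ n > 3 * k then 0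
  else
    -- dp = [1] + [0]*n; for _ in range(k): dp = step dp; return dp[n]
    let dp := (List.range k.toNat).foldl (fun dp _ => pvAltStep n.toNat dp)
                 (1 :: List.replicate n.toNat 0)
    dp.getD n.toNat 0

-- ===== PRECONDITION & SPEC =====
-- Pre_ excludes only inputs where BOTH position and turn are large: there A's recursion
-- nests ~min(position, turn) deep and hits Python's recursion limit (RecursionError).
def Pre_calculate_paths_to_position_py (position : Int) (turn : Int) : Prop :=
  position ≤ 900 ∨ turn ≤ 900
instance (position : Int) (turn : Int) : Decidable (Pre_calculate_paths_to_position_py position turn) := by unfold Pre_calculate_paths_to_position_py; infer_instance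
def pvWitness_calculate_paths_to_position_py : Int × Int := (4, 2)

def Spec_calculate_paths_to_position_py (position : Int) (turn : Int) (out : Int) : Prop := out = calculate_paths_to_position_py_alt position turn
instance (position : Int) (turn : Int) (out : Int) : Decidable (Spec_calculate_paths_to_position_py position turn out) := by unfold Spec_calculate_paths_to_position_py; infer_instance

-- ===== CLAIM (what is proved, stated in full; the proofs are below) =====
def Claim_equal_calculate_paths_to_position_py : Prop := ∀ (position : Int) (turn : Int), Dom_calculate_paths_to_position_py position turn → Pre_calculate_paths_to_position_py position turn → Spec_calculate_paths_to_position_py position turn (calculate_paths_to_position_py position turn)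

-- ===== LEMMAS AND PROOFS =====

-- A returns 0 whenever neither the base case nor the recursive branch applies.
theorem pvA_zero_of (p t : Int) (h : p < 1 ∨ t < 0 ∨ (t = 0 ∧ p ≠ 1)) :
    calculate_paths_to_position_py p t = 0 := by
  rw [calculate_paths_to_position_py]
  split_ifs with h1 h2
  · exact absurd h1 (by rcases h with h | h | h <;> intro hc <;> omega)
  · rfl
  · exact absurd h (by simp only [not_and, not_or, not_lt, not_le] at h1 h2 ⊢; omega)

-- A's recursive unfolding in the interesting branch.
-- A's recursive unfolding in the interesting branch.
theorem pvA_rec (p t : Int) (hp : 1 ≤ p) (ht : 0 < t) (hne : ¬(p = 1 ∧ t = 0)) :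
    calculate_paths_to_position_py p t =
      calculate_paths_to_position_py (p - 1) (t - 1)
        + calculate_paths_to_position_py (p - 2) (t - 1)
        + calculate_paths_to_position_py (p - 3) (t - 1) := by
  rw [calculate_paths_to_position_py]
  rw [if_neg hne, if_neg (by simp only [not_or, not_lt, not_le]; omega)]
  ring

theorem pvA_zero_high : ∀ (k : Nat) (p t : Int), t.toNat = k → p - 1 > 3 * t →
    calculate_paths_to_position_py p t = 0 := by
  intro k
  induction k with
  | zero =>
      intro p t hk h
      exact pvA_zero_of p t (by omega)
  | succ k ih =>
      intro p t hk h
      have ht : 0 < t := by omega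
      by_cases hp : p < 1
      · exact pvA_zero_of p t (Or.inl hp)
      · rw [pvA_rec p t (by omega) ht (by rintro ⟨_, rfl⟩; omega)]
        rw [ih (p-1) (t-1) (by omega) (by omega), ih (p-2) (t-1) (by omega) (by omega),
            ih (p-3) (t-1) (by omega) (by omega)]
        ring

theorem pvA_zero_low : ∀ (k : Nat) (p t : Int), t.toNat = k → p - 1 < t →
    calculate_paths_to_position_py p t = 0 := by
  intro k
  induction k with
  | zero =>
      intro p t hk h
      exact pvA_zero_of p t (by omega)
  | succ k ih =>
      intro p t hk h
      have ht : 0 < t := by omega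
      by_cases hp : p < 1
      · exact pvA_zero_of p t (Or.inl hp)
      · rw [pvA_rec p t (by omega) ht (by rintro ⟨_, rfl⟩; omega)]
        rw [ih (p-1) (t-1) (by omega) (by omega), ih (p-2) (t-1) (by omega) (by omega),
            ih (p-3) (t-1) (by omega) (by omega)]
        ring

-- the DP invariant: after t steps, entry j of the table is A (j+1) t
def pvInv (N : Nat) (t : Int) (dp : List Int) : Prop :=
  ∀ j : Nat, j ≤ N → dp.getD j 0 = calculate_paths_to_position_py ((j : Int) + 1) t

theorem pvInv_init (N : Nat) : pvInv N 0 (1 :: List.replicate N 0) := by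
  intro j hj
  cases j with
  | zero =>
      simp [calculate_paths_to_position_py]
  | succ j =>
      simp only [List.getD_cons_succ]
      rw [List.getD_replicate]
      · exact (pvA_zero_of _ _ (by right; right; exact ⟨rfl, by omega⟩)).symm
      · omega

theorem pvInv_step (N : Nat) (t : Int) (ht : 0 ≤ t) (dp : List Int)
    (h : pvInv N t dp) : pvInv N (t + 1) (pvAltStep N dp) := by
  intro j hj
  cases j with
  | zero =>
      have hr := pvA_rec 1 (t + 1) (by omega) (by omega) (by rintro ⟨_, h⟩; omega)
      rw [show (1 : Int) - 1 = 0 by ring, show (1 : Int) - 2 = -1 by ring,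
          show (1 : Int) - 3 = -2 by ring, show t + 1 - 1 = t by ring] at hr
      rw [pvA_zero_of 0 t (by omega), pvA_zero_of (-1) t (by omega),
          pvA_zero_of (-2) t (by omega)] at hr
      simpa [pvAltStep] using hr.symm
  | succ j =>
      have hjN : j < N := by omega
      have hget : (pvAltStep N dp).getD (j + 1) 0 =
          dp.getD j 0
            + (if j + 1 ≥ 2 then dp.getD (j - 1) 0 else 0)
            + (if j + 1 ≥ 3 then dp.getD (j - 2) 0 else 0) := by
        simp [pvAltStep, List.getD, hjN, Nat.add_comm 1 j]
      have hr := pvA_rec ((j : Int) + 2) (t + 1) (by omega) (by omega) (by rintro ⟨h, _⟩; omega)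
      rw [show (j : Int) + 2 - 1 = (j : Int) + 1 by ring, show (j : Int) + 2 - 2 = (j : Int) by ring,
          show (j : Int) + 2 - 3 = (j : Int) - 1 by ring, show t + 1 - 1 = t by ring] at hr
      rw [hget, show ((j + 1 : Nat) : Int) + 1 = (j : Int) + 2 by push_cast; ring, hr]
      congr 1
      · congr 1
        · exact h j (by omega)
        · by_cases h2 : j + 1 ≥ 2
          · rw [if_pos h2, h (j - 1) (by omega)]
            congr 1
            push_cast [Nat.cast_sub (by omega : 1 ≤ j)]
            ring
          · have hj0 : j = 0 := by omega
            rw [if_neg h2, hj0]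
            exact (pvA_zero_of _ _ (by omega)).symm
      · by_cases h3 : j + 1 ≥ 3
        · rw [if_pos h3, h (j - 2) (by omega)]
          congr 1
          push_cast [Nat.cast_sub (by omega : 2 ≤ j)]
          ring
        · rw [if_neg h3]
          exact (pvA_zero_of _ _ (by left; omega)).symm

theorem pvInv_iter (N K : Nat) :
    pvInv N (K : Int)
      ((List.range K).foldl (fun dp _ => pvAltStep N dp) (1 :: List.replicate N 0)) := by
  induction K with
  | zero => exact pvInv_init N
  | succ K ih =>
      rw [List.range_succ, List.foldl_append]
      have := pvInv_step N (K : Int) (by positivity) _ ih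
      simpa [Nat.cast_add] using this

-- ===== VERDICT (by name: the statement is the Claim_ definition above) =====
theorem calculate_paths_to_position_py_spec : Claim_equal_calculate_paths_to_position_py := by
  intro position turn _ _
  unfold Spec_calculate_paths_to_position_py calculate_paths_to_position_py_alt
  simp only []
  split_ifs with hg
  · -- the guard region: A is 0 there too
    rcases hg with h | h | h | h
    · exact pvA_zero_of _ _ (by omega)
    · exact pvA_zero_of _ _ (by omega)
    · exact pvA_zero_low turn.toNat _ _ rfl (by omega)
    · exact pvA_zero_high turn.toNat _ _ rfl (by omega)
  · simp only [not_or, not_lt] at hg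
    obtain ⟨h0, hk0, hnk, hn3⟩ := hg
    have hinv := pvInv_iter (position - 1).toNat turn.toNat
    have := hinv (position - 1).toNat (le_refl _)
    rw [this]
    congr 1 <;> omega
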